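-- pv_equiv track=rewrite | github.com/Kimajun0919/qa-mvp-BE | app/services/checklist.py | _split_parts
-- ===== SOURCE A (Python) =====
-- from typing import Any, Dict, List, Optional, Set
--
-- def _split_parts(text: str, delimiters: List[str], max_parts: int = 4) -> List[str]:
--     out = [str(text or "").strip()]
--     for d in delimiters:
--         next_out: List[str] = []
--         for item in out:
--             if d in item:
--                 next_out.extend([p.strip() for p in item.split(d)])
--             else:
--                 next_out.append(item)
--         out = next_out
--     dedup: List[str] = []
--     seen = set()
--     for item in out:
--         if not item or item in seen:
--             continue
--         seen.add(item)
--         dedup.append(item)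
--         if len(dedup) >= max_parts:
--             break
--     return dedup or [str(text or "").strip()]
-- ===== SOURCE B (Python) =====
-- def _split_parts(text, delimiters, max_parts=4):
--     base = str(text or "").strip()
--     ds = list(delimiters)
--
--     def explode(piece, lo, hi):
--         # split one piece by the delimiters ds[lo:hi], divide and conquer
--         if hi <= lo:
--             return [piece]
--         if hi == lo + 1:
--             d = ds[lo]
--             return [p.strip() for p in piece.split(d)] if d in piece else [piece]
--         mid = (lo + hi) // 2
--         left = explode(piece, lo, mid)
--         if len(left) == 1:
--             return explode(left[0], mid, hi)
--         return [q for p in left for q in explode(p, mid, hi)]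
--
--     seen = set()
--     parts = []
--     for t in explode(base, 0, len(ds)):
--         if t and t not in seen:
--             seen.add(t)
--             parts.append(t)
--             if len(parts) >= max_parts:
--                 break
--     return parts or [base]
-- ===== Notes on version B (the rewrite author's own statement) =====
-- stated objective: alternative
-- what changed: A's breadth-first per-delimiter rebuilds of the whole piece list are replaced by a per-piece divide-and-conquer recursion over the delimiter range, followed by one collect-until-enough dedup pass; Pre_ excludes an empty-string delimiter, on which both programs raise ValueError from str.split.
import Mathlib
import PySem

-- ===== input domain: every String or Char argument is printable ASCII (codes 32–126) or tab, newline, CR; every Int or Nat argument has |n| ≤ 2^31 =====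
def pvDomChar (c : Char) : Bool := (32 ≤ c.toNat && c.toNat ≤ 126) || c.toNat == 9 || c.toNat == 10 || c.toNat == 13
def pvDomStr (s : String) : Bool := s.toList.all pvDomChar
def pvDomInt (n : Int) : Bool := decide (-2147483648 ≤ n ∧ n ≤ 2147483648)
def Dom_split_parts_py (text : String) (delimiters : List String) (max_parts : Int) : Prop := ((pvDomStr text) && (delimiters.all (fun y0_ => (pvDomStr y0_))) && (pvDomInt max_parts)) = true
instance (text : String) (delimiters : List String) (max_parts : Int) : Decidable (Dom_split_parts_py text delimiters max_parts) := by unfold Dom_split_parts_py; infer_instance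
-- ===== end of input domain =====

-- B replaces A's breadth-first per-delimiter rebuilds of the whole piece list by a per-piece
-- divide-and-conquer recursion over the delimiter range plus one collect-until-enough pass
-- (objective: alternative).

-- ===== PORT A =====
def split_parts_py (text : String) (delimiters : List String) (max_parts : Int) : List String :=
  let base := PySem.Str.strip (if text = "" then "" else text)  -- str(text or "").strip(); 'text or ""' is text unless empty
  let out := delimiters.foldl (fun out d =>
    out.foldl (fun acc item =>
      if PySem.Str.isIn d item then
        -- split? is none exactly for d = "" (Python ValueError), excluded by Pre_
        acc ++ ((PySem.Str.split? item d).getD []).map PySem.Str.strip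
      else acc ++ [item]) []) [base]
  let st := out.foldl (fun (st : List String × PySem.Set String × Bool) item =>
    if st.2.2 then st  -- past the break
    else if item = "" || PySem.Set.contains st.2.1 item then st
    else
      let dd := st.1 ++ [item]
      (dd, PySem.Set.add st.2.1 item, decide (max_parts ≤ (dd.length : Int))))
    ([], PySem.Set.empty, false)
  if st.1 = [] then [base] else st.1

-- ===== PORT B =====
-- Source B's explode: split one piece by the delimiters ds[lo:hi], divide and conquer.
-- fuel (≥ hi - lo at every call) only makes the recursion structural; it never runs out.
def pvExplodeR (ds : List String) : Nat → Nat → Nat → String → List String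
  | 0, _, _, piece => [piece]
  | fuel + 1, lo, hi, piece =>
    if hi ≤ lo then [piece]
    else if hi = lo + 1 then
      let d := (PySem.List.pyGet? ds (lo : Int)).getD ""  -- index is always in range here
      if PySem.Str.isIn d piece then
        ((PySem.Str.split? piece d).getD []).map PySem.Str.strip
      else [piece]
    else
      -- mid := (lo + hi) // 2; left := explode(piece, lo, mid)
      if (pvExplodeR ds fuel lo ((lo + hi) / 2) piece).length = 1 then
        pvExplodeR ds fuel ((lo + hi) / 2) hi ((pvExplodeR ds fuel lo ((lo + hi) / 2) piece).headD "")
      else (pvExplodeR ds fuel lo ((lo + hi) / 2) piece).flatMap (pvExplodeR ds fuel ((lo + hi) / 2) hi)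

-- Source B's collect loop: skip empty/seen tokens, append, break once len(parts) >= max_parts
-- (the break becomes the early-return of this structural recursion).
def pvCollect (max_parts : Int) (seen : PySem.Set String) (parts : List String) : List String → List String
  | [] => parts
  | t :: ts =>
    if t = "" || PySem.Set.contains seen t then pvCollect max_parts seen parts ts
    else if max_parts ≤ ((parts ++ [t]).length : Int) then parts ++ [t]
    else pvCollect max_parts (PySem.Set.add seen t) (parts ++ [t]) ts

def split_parts_py_alt (text : String) (delimiters : List String) (max_parts : Int) : List String :=
  let base := PySem.Str.strip (if text = "" then "" else text)
  let parts := pvCollect max_parts PySem.Set.empty []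
    (pvExplodeR delimiters delimiters.length 0 delimiters.length base)
  if parts = [] then [base] else parts

-- ===== PRECONDITION & SPEC =====
-- Pre_ excludes an empty-string delimiter, on which Python's str.split raises ValueError in A (and in B).
def Pre_split_parts_py (text : String) (delimiters : List String) (max_parts : Int) : Prop :=
  "" ∉ delimiters
instance (text : String) (delimiters : List String) (max_parts : Int) : Decidable (Pre_split_parts_py text delimiters max_parts) := by unfold Pre_split_parts_py; infer_instance

def pvWitness_split_parts_py : String × List String × Int := ("a, b; a", [",", ";"], 4)

def Spec_split_parts_py (text : String) (delimiters : List String) (max_parts : Int) (out : List String) : Prop := out = split_parts_py_alt text delimiters max_parts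
instance (text : String) (delimiters : List String) (max_parts : Int) (out : List String) : Decidable (Spec_split_parts_py text delimiters max_parts out) := by unfold Spec_split_parts_py; infer_instance

-- ===== CLAIM (what is proved, stated in full; the proofs are below) =====
def Claim_equal_split_parts_py : Prop := ∀ (text : String) (delimiters : List String) (max_parts : Int), Dom_split_parts_py text delimiters max_parts → Pre_split_parts_py text delimiters max_parts → Spec_split_parts_py text delimiters max_parts (split_parts_py text delimiters max_parts)

-- ===== LEMMAS AND PROOFS =====

-- linear depth-first explode (proof helper only: the flattened form both ports compute)
def pvExplode (ds : List String) (piece : String) : List String :=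
  match ds with
  | [] => [piece]
  | d :: rest =>
    if PySem.Str.isIn d piece then
      ((PySem.Str.split? piece d).getD []).flatMap (fun p => pvExplode rest (PySem.Str.strip p))
    else pvExplode rest piece

lemma pvExplode_append (l1 l2 : List String) : ∀ piece,
    pvExplode (l1 ++ l2) piece = (pvExplode l1 piece).flatMap (pvExplode l2) := by
  induction l1 with
  | nil => intro piece; simp [pvExplode]
  | cons d rest ih =>
    intro piece
    by_cases h : PySem.Chars.isIn d.toList piece.toList = true
    · simp [pvExplode, h, ih, List.flatMap_assoc]
    · simp [pvExplode, h, ih]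

lemma pvExplodeR_eq (ds : List String) : ∀ (fuel lo hi : Nat), hi - lo ≤ fuel → hi ≤ ds.length →
    ∀ piece, pvExplodeR ds fuel lo hi piece = pvExplode ((ds.drop lo).take (hi - lo)) piece := by
  intro fuel
  induction fuel with
  | zero =>
    intro lo hi h1 _ piece
    rw [show hi - lo = 0 from by omega]
    simp [pvExplodeR, pvExplode]
  | succ n ih =>
    intro lo hi h1 h2 piece
    rw [pvExplodeR]
    by_cases hle : hi ≤ lo
    · rw [if_pos hle]
      rw [show hi - lo = 0 from by omega]
      simp [pvExplode]
    · rw [if_neg hle]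
      by_cases hone : hi = lo + 1
      · rw [if_pos hone]
        have hlt : lo < ds.length := by omega
        have hd : (PySem.List.pyGet? ds ((lo : Nat) : Int)).getD "" = ds[lo] := by
          rw [PySem.List.pyGet?_natCast]
          simp [hlt]
        have htk : (ds.drop lo).take (hi - lo) = [ds[lo]] := by
          rw [show hi - lo = 1 from by omega]
          rw [List.take_one, List.head?_drop]
          simp [hlt]
        rw [htk]
        simp only [hd]
        by_cases h : PySem.Chars.isIn (ds[lo]).toList piece.toList = true
        · simp [pvExplode, h, List.map_eq_flatMap]
        · simp [pvExplode, h]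
      · rw [if_neg hone]
        have hmidlt : (lo + hi) / 2 < hi := by omega
        have hltmid : lo < (lo + hi) / 2 := by omega
        rw [ih lo ((lo + hi) / 2) (by omega) (by omega)]
        have hsplit : (ds.drop lo).take (hi - lo)
            = (ds.drop lo).take ((lo + hi) / 2 - lo)
              ++ (ds.drop ((lo + hi) / 2)).take (hi - (lo + hi) / 2) := by
          rw [show hi - lo = ((lo + hi) / 2 - lo) + (hi - (lo + hi) / 2) from by omega]
          rw [List.take_add]
          congr 1
          rw [List.drop_drop]
          congr 2
          omega
        rw [hsplit, pvExplode_append]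
        by_cases hl : (pvExplode ((ds.drop lo).take ((lo + hi) / 2 - lo)) piece).length = 1
        · rw [if_pos hl]
          obtain ⟨a, ha⟩ := List.length_eq_one_iff.mp hl
          rw [ha]
          simp only [List.headD_cons, List.flatMap_cons, List.flatMap_nil, List.append_nil]
          rw [ih ((lo + hi) / 2) hi (by omega) h2]
        · rw [if_neg hl]
          congr 1
          funext p
          rw [ih ((lo + hi) / 2) hi (by omega) h2]

-- A's breadth-first delimiter loop equals the depth-first explode, flattened.
lemma pv_flat (ds : List String) : ∀ l : List String,
    ds.foldl (fun out d =>
      out.foldl (fun acc item =>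
        if PySem.Str.isIn d item then
          acc ++ ((PySem.Str.split? item d).getD []).map PySem.Str.strip
        else acc ++ [item]) []) l
    = l.flatMap (pvExplode ds) := by
  induction ds with
  | nil => intro l; simp [pvExplode]
  | cons d rest ih =>
    intro l
    simp only [List.foldl_cons]
    have hstep : l.foldl (fun acc item =>
        if PySem.Str.isIn d item then
          acc ++ ((PySem.Str.split? item d).getD []).map PySem.Str.strip
        else acc ++ [item]) []
        = l.flatMap (fun item =>
            if PySem.Str.isIn d item then
              ((PySem.Str.split? item d).getD []).map PySem.Str.strip
            else [item]) := by
      have hb : (fun (acc : List String) item =>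
          if PySem.Str.isIn d item then
            acc ++ ((PySem.Str.split? item d).getD []).map PySem.Str.strip
          else acc ++ [item])
          = (fun acc item => acc ++ (if PySem.Str.isIn d item then
              ((PySem.Str.split? item d).getD []).map PySem.Str.strip else [item])) := by
        funext acc item; split <;> rfl
      rw [hb, PySem.List.foldl_append_eq_flatMap]
      simp
    rw [hstep, ih, List.flatMap_assoc]
    congr 1
    funext item
    by_cases h : PySem.Chars.isIn d.toList item.toList = true
    · simp [pvExplode, h, List.flatMap_map]
    · simp [pvExplode, h]

-- The new non-empty distinct elements of l, in order, relatively to already-seen 'seen'.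
def pvDR (seen : List String) : List String → List String
  | [] => []
  | x :: xs => if x = "" ∨ x ∈ seen then pvDR seen xs else x :: pvDR (seen ++ [x]) xs

-- A's dedup loop with its break flag produces the first L new elements
-- (f is A's loop body, passed as a parameter so the proof can rewrite its applications).
lemma pv_loopA (max_parts : Int) (L : Nat)
    (hL : L = (if max_parts > 0 then max_parts else 1).toNat)
    (f : List String × PySem.Set String × Bool → String → List String × PySem.Set String × Bool)
    (hf : ∀ st item, f st item =
      if st.2.2 then st
      else if item = "" || PySem.Set.contains st.2.1 item then st
      else (st.1 ++ [item], PySem.Set.add st.2.1 item,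
            decide (max_parts ≤ ((st.1 ++ [item]).length : Int)))) :
    ∀ (out dd : List String) (b : Bool), dd.Nodup →
      (b = true → dd.length = L) → (b = false → dd.length < L) →
      (out.foldl f (dd, (dd : PySem.Set String), b)).1
      = dd ++ (pvDR dd out).take (L - dd.length) := by
  intro out
  induction out with
  | nil => intro dd b _ _ _; simp [pvDR]
  | cons x xs ih =>
    intro dd b hnd hbt hbf
    cases b with
    | true =>
      have hlen := hbt rfl
      have hstep : f (dd, (dd : PySem.Set String), true) = fun _ => (dd, (dd : PySem.Set String), true) := by
        funext item; rw [hf]; simp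
      rw [List.foldl_cons, hstep]
      rw [ih dd true hnd hbt (by intro h; cases h)]
      simp [hlen]
    | false =>
      have hlt := hbf rfl
      by_cases hc : x = "" ∨ x ∈ dd
      · have hstep : f (dd, (dd : PySem.Set String), false) x = (dd, (dd : PySem.Set String), false) := by
          rw [hf]
          rcases hc with h | h
          · simp [h]
          · simp [PySem.Set.contains, h]
        rw [List.foldl_cons, hstep]
        rw [ih dd false hnd (by intro h; cases h) hbf]
        rw [show pvDR dd (x :: xs) = pvDR dd xs from by
          simp only [pvDR]; rw [if_pos hc]]
      · rw [not_or] at hc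
        obtain ⟨hx, hmem⟩ := hc
        set b' := decide (max_parts ≤ (((dd ++ [x]).length : Nat) : Int)) with hb'
        have hstep : f (dd, (dd : PySem.Set String), false) x
            = (dd ++ [x], ((dd ++ [x] : List String) : PySem.Set String), b') := by
          rw [hf]
          simp [hx, PySem.Set.contains, hmem, PySem.Set.add, hb']
        have hnd' : (dd ++ [x]).Nodup := by
          simp [List.nodup_append, hnd]
          intro a ha h
          subst h
          exact hmem ha
        have hlen' : (dd ++ [x]).length = dd.length + 1 := by simp
        have hbt' : b' = true → (dd ++ [x]).length = L := by
          intro h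
          rw [hb'] at h
          have hmp : max_parts ≤ ((dd.length + 1 : Nat) : Int) := by
            simpa [hlen'] using of_decide_eq_true h
          rw [hlen']
          by_cases hpos : max_parts > 0
          · have : L = max_parts.toNat := by simp [hL, hpos]
            omega
          · have : L = 1 := by simp [hL, hpos]
            omega
        have hbf' : b' = false → (dd ++ [x]).length < L := by
          intro h
          rw [hb'] at h
          have hmp : ¬ max_parts ≤ ((dd.length + 1 : Nat) : Int) := by
            simpa [hlen'] using of_decide_eq_false h
          have hpos : max_parts > 0 := by omega
          have : L = max_parts.toNat := by simp [hL, hpos]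
          rw [hlen']
          omega
        rw [List.foldl_cons, hstep]
        rw [ih (dd ++ [x]) b' hnd' hbt' hbf']
        have htake : L - dd.length = (L - (dd ++ [x]).length) + 1 := by
          rw [hlen']; omega
        rw [show pvDR dd (x :: xs) = x :: pvDR (dd ++ [x]) xs from by
          simp [pvDR, hx, hmem]]
        rw [htake, List.take_succ_cons]
        simp

-- B's collect loop produces the same first L new elements.
lemma pv_collect (max_parts : Int) (L : Nat)
    (hL : L = (if max_parts > 0 then max_parts else 1).toNat) :
    ∀ (out dd : List String), dd.length < L →
      pvCollect max_parts (dd : PySem.Set String) dd out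
      = dd ++ (pvDR dd out).take (L - dd.length) := by
  intro out
  induction out with
  | nil => intro dd _; simp [pvCollect, pvDR]
  | cons x xs ih =>
    intro dd hlt
    rw [pvCollect]
    by_cases hc : x = "" ∨ x ∈ dd
    · rw [if_pos (by
        rcases hc with h | h
        · simp [h]
        · simp [PySem.Set.contains, h])]
      rw [ih dd hlt]
      rw [show pvDR dd (x :: xs) = pvDR dd xs from by
        simp only [pvDR]; rw [if_pos hc]]
    · rw [not_or] at hc
      obtain ⟨hx, hmem⟩ := hc
      rw [if_neg (by simp [hx, PySem.Set.contains, hmem])]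
      rw [show pvDR dd (x :: xs) = x :: pvDR (dd ++ [x]) xs from by
        simp [pvDR, hx, hmem]]
      have hlen' : (dd ++ [x]).length = dd.length + 1 := by simp
      by_cases hbrk : max_parts ≤ (((dd ++ [x]).length : Nat) : Int)
      · rw [if_pos hbrk]
        have hLeq : L = dd.length + 1 := by
          by_cases hpos : max_parts > 0
          · have : L = max_parts.toNat := by simp [hL, hpos]
            rw [hlen'] at hbrk
            omega
          · have : L = 1 := by simp [hL, hpos]
            omega
        rw [show L - dd.length = 1 from by omega, List.take_succ_cons]
        simp
      · rw [if_neg hbrk]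
        have hpos : max_parts > 0 := by
          rw [hlen'] at hbrk; omega
        have hLv : L = max_parts.toNat := by simp [hL, hpos]
        have hlt' : (dd ++ [x]).length < L := by
          rw [hlen'] at hbrk ⊢; omega
        rw [show PySem.Set.add (dd : PySem.Set String) x = ((dd ++ [x] : List String) : PySem.Set String) from by
          simp [PySem.Set.add, PySem.Set.contains, hmem]]
        rw [ih (dd ++ [x]) hlt']
        rw [show L - dd.length = (L - (dd ++ [x]).length) + 1 from by rw [hlen']; omega]
        rw [List.take_succ_cons]
        simp

-- ===== VERDICT (by name: the statement is the Claim_ definition above) =====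
theorem split_parts_py_spec : Claim_equal_split_parts_py := by
  intro text delimiters max_parts _ _
  unfold Spec_split_parts_py split_parts_py split_parts_py_alt
  simp only []
  set base := PySem.Str.strip (if text = "" then "" else text) with hbase
  set L : Nat := (if max_parts > 0 then max_parts else 1).toNat with hLdef
  have hL1 : 1 ≤ L := by
    rw [hLdef]
    by_cases hpos : max_parts > 0
    · simp [hpos]; omega
    · simp [hpos]
  have hR : pvExplodeR delimiters delimiters.length 0 delimiters.length base = pvExplode delimiters base := by
    rw [pvExplodeR_eq delimiters delimiters.length 0 delimiters.length (by omega) (by omega)]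
    simp
  have hout := pv_flat delimiters [base]
  rw [show ([base] : List String).flatMap (pvExplode delimiters) = pvExplode delimiters base by simp] at hout
  have hloop := pv_loopA max_parts L hLdef
    (fun (st : List String × PySem.Set String × Bool) item =>
      if st.2.2 then st
      else if item = "" || PySem.Set.contains st.2.1 item then st
      else (st.1 ++ [item], PySem.Set.add st.2.1 item,
            decide (max_parts ≤ ((st.1 ++ [item]).length : Int))))
    (fun _ _ => rfl)
    (pvExplode delimiters base) [] false
    (by simp) (by intro h; cases h) (fun _ => by simpa using hL1)
  have hcol := pv_collect max_parts L hLdef (pvExplode delimiters base) [] (by simpa using hL1)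
  simp only [PySem.Set.empty]
  rw [hout, hloop, hR, hcol]
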